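-- pv_equiv track=rewrite | github.com/dandavison/misc-python | lc-synonymous-sentences.py | get_synonyms
-- ===== SOURCE A (Python) =====
-- def get_synonyms(word, edges):
--     stack, visited = [word], {word}
--     while stack:
--         w = stack.pop()
--         for neighbor in edges.get(w, set()):
--             if neighbor not in visited:
--                 stack.append(neighbor)
--                 visited.add(neighbor)
--     return visited
-- ===== SOURCE B (Python) =====
-- def get_synonyms(word, edges):
--     visited = set()
--
--     def visit(w):
--         visited.add(w)
--         for neighbor in edges.get(w, set()):
--             if neighbor not in visited:
--                 visit(neighbor)
--
--     visit(word)
--     return visited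
-- ===== Notes on version B (the rewrite author's own statement) =====
-- stated objective: alternative
-- what changed: Replaces the iterative worklist (explicit stack, mark-on-push) with a recursive depth-first search (nested visit helper, mark-on-visit); both return the same connected component as a set.
import Mathlib
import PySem

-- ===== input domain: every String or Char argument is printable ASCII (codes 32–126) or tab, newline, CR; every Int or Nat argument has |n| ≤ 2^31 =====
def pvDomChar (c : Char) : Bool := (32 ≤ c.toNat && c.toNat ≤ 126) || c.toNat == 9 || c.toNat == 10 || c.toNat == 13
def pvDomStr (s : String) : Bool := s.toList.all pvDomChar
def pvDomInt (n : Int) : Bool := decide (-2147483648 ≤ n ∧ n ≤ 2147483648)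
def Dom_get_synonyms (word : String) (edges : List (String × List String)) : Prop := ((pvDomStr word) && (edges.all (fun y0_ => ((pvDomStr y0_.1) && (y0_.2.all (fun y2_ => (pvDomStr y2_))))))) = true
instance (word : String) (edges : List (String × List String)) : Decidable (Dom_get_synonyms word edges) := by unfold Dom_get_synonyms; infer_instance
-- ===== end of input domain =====

-- B replaces A's iterative worklist (explicit stack, mark-on-push) by a recursive depth-first
-- search (a visit helper that marks its node and recurses on unvisited neighbours); both return
-- the connected component of `word` as a Python set.  Python sets are unordered, so both ports
-- return the canonical sorted list of the set they build (outputs are compared as sets).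

-- ===== PORT A =====
-- shared helper: edges.get(w, set()) — dict lookup (first match) with empty default
def pvNbrs (edges : List (String × List String)) (w : String) : List String :=
  (PySem.Dict.mk edges).getD w []

-- universe of all strings the traversal can ever see; its size bounds the number of loop
-- iterations, so it serves as the (provably sufficient) fuel of the while-loop
def pvUniv (word : String) (edges : List (String × List String)) : PySem.Set String :=
  PySem.Set.ofList (word :: edges.flatMap (fun p => p.1 :: p.2))

-- A's loop body for one neighbour: push/mark it if unvisited
def pvStepA (sv : List String × PySem.Set String) (nb : String) : List String × PySem.Set String :=
  if PySem.Set.contains sv.2 nb then sv else (sv.1 ++ [nb], PySem.Set.add sv.2 nb)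

-- A's while-loop: pop last element of the stack, push/mark every unvisited neighbour
def pvLoopA (edges : List (String × List String)) : Nat → List String → PySem.Set String → PySem.Set String
  | 0, _, visited => visited
  | fuel+1, stack, visited =>
    if h : stack = [] then visited
    else
      let sv := (pvNbrs edges (stack.getLast h)).foldl pvStepA (stack.dropLast, visited)
      pvLoopA edges fuel sv.1 sv.2

def get_synonyms (word : String) (edges : List (String × List String)) : List String :=
  PySem.List.sorted
    (pvLoopA edges ((pvUniv word edges).length + 1) [word] (PySem.Set.ofList [word]))
    (fun x => x)

-- ===== PORT B =====
-- recursive DFS: visit w = mark w, then recurse on each unvisited neighbour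
mutual
def pvVisitB (edges : List (String × List String)) (fuel : Nat) (visited : PySem.Set String) (w : String) : PySem.Set String :=
  match fuel with
  | 0 => PySem.Set.add visited w              -- fuel exhausted (proved unreachable from the initial call)
  | f+1 => pvForB edges f (PySem.Set.add visited w) (pvNbrs edges w)
termination_by (fuel, 0, 0)

def pvForB (edges : List (String × List String)) (fuel : Nat) (visited : PySem.Set String) (l : List String) : PySem.Set String :=
  match l with
  | [] => visited
  | nb :: rest =>
    if PySem.Set.contains visited nb then pvForB edges fuel visited rest
    else pvForB edges fuel (pvVisitB edges fuel visited nb) rest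
termination_by (fuel, 1, l.length)
end

def get_synonyms_alt (word : String) (edges : List (String × List String)) : List String :=
  PySem.List.sorted
    (pvVisitB edges (pvUniv word edges).length PySem.Set.empty word)
    (fun x => x)

-- ===== PRECONDITION & SPEC =====
def Spec_get_synonyms (word : String) (edges : List (String × List String)) (out : List String) : Prop := out = get_synonyms_alt word edges
instance (word : String) (edges : List (String × List String)) (out : List String) : Decidable (Spec_get_synonyms word edges out) := by unfold Spec_get_synonyms; infer_instance

-- ===== CLAIM (what is proved, stated in full; the proofs are below) =====
def Claim_equal_get_synonyms : Prop := ∀ (word : String) (edges : List (String × List String)), Dom_get_synonyms word edges → Spec_get_synonyms word edges (get_synonyms word edges)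

-- ===== LEMMAS AND PROOFS =====

-- reachability in the synonym graph, rooted at `word`
inductive pvReach (edges : List (String × List String)) (word : String) : String → Prop
  | base : pvReach edges word word
  | step {w nb : String} : pvReach edges word w → nb ∈ pvNbrs edges w → pvReach edges word nb

theorem pvReach_trans (edges : List (String × List String)) {a b c : String}
    (h1 : pvReach edges a b) (h2 : pvReach edges b c) : pvReach edges a c := by
  induction h2 with
  | base => exact h1
  | step _ hn ih => exact .step ih hn

theorem pvReach_closed (edges : List (String × List String)) (word : String) (S : List String)
    (hw : word ∈ S) (hc : ∀ v ∈ S, ∀ nb ∈ pvNbrs edges v, nb ∈ S) :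
    ∀ x, pvReach edges word x → x ∈ S := by
  intro x hx
  induction hx with
  | base => exact hw
  | step _ hn ih => exact hc _ ih _ hn

theorem mem_pvNbrs (edges : List (String × List String)) (w x : String)
    (hx : x ∈ pvNbrs edges w) : ∃ p ∈ edges, x ∈ p.2 := by
  unfold pvNbrs PySem.Dict.getD PySem.Dict.get? at hx
  cases hfind : List.find? (fun p => p.1 == w) (PySem.Dict.mk edges).items with
  | none => rw [hfind] at hx; simp at hx
  | some p =>
    rw [hfind] at hx
    simp at hx
    exact ⟨p, List.mem_of_find?_eq_some hfind, hx⟩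

theorem mem_pvUniv_of_nbr (word : String) (edges : List (String × List String)) {w x : String}
    (hx : x ∈ pvNbrs edges w) : x ∈ pvUniv word edges := by
  obtain ⟨p, hp, hxp⟩ := mem_pvNbrs edges w x hx
  unfold pvUniv
  rw [PySem.Set.mem_ofList]
  exact List.mem_cons_of_mem _ (List.mem_flatMap.2 ⟨p, hp, List.mem_cons_of_mem _ hxp⟩)

theorem word_mem_pvUniv (word : String) (edges : List (String × List String)) :
    word ∈ pvUniv word edges := by
  unfold pvUniv
  rw [PySem.Set.mem_ofList]
  exact List.mem_cons_self

-- characterisation of A's inner for-loop: the same fresh neighbours are appended to the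
-- stack and to visited
theorem pvStepA_old (stack visited : List String) (nb : String)
    (h : PySem.Set.contains visited nb = true) : pvStepA (stack, visited) nb = (stack, visited) := by
  have hm : nb ∈ visited := (PySem.Set.contains_iff visited nb).1 h
  unfold pvStepA
  simp [hm]

theorem pvStepA_new (stack visited : List String) (nb : String)
    (h : PySem.Set.contains visited nb = false) :
    pvStepA (stack, visited) nb = (stack ++ [nb], visited ++ [nb]) := by
  have hm : nb ∉ visited := by
    intro hmem
    rw [(PySem.Set.contains_iff visited nb).2 hmem] at h
    simp at h
  unfold pvStepA PySem.Set.add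
  simp [hm]

theorem pvFoldA_spec (l : List String) : ∀ (stack visited : List String),
    ∃ news : List String,
      (l.foldl pvStepA ((stack, visited) : List String × PySem.Set String))
        = (stack ++ news, visited ++ news)
      ∧ (∀ x ∈ news, x ∈ l ∧ x ∉ visited)
      ∧ (∀ x, x ∈ visited ++ news ↔ x ∈ visited ∨ x ∈ l)
      ∧ (visited.Nodup → (visited ++ news).Nodup) := by
  induction l with
  | nil =>
    intro stack visited
    exact ⟨[], by simp, by simp, by simp, by simp⟩
  | cons nb rest ih =>
    intro stack visited
    cases hc : PySem.Set.contains visited nb with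
    | true =>
      have hnbv : nb ∈ visited := (PySem.Set.contains_iff visited nb).1 hc
      obtain ⟨news, h1, h2, h3, h4⟩ := ih stack visited
      refine ⟨news, ?_, ?_, ?_, h4⟩
      · rw [List.foldl_cons, pvStepA_old stack visited nb hc]
        exact h1
      · exact fun x hx => ⟨List.mem_cons_of_mem _ (h2 x hx).1, (h2 x hx).2⟩
      · intro x
        rw [h3 x]
        constructor
        · rintro (h | h)
          · exact Or.inl h
          · exact Or.inr (List.mem_cons_of_mem _ h)
        · rintro (h | h)
          · exact Or.inl h
          · rcases List.mem_cons.1 h with rfl | h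
            · exact Or.inl hnbv
            · exact Or.inr h
    | false =>
      have hnbv : nb ∉ visited := by
        intro h
        rw [(PySem.Set.contains_iff visited nb).2 h] at hc
        simp at hc
      have hadd : PySem.Set.add visited nb = visited ++ [nb] := by
        unfold PySem.Set.add
        rw [hc]
        simp
      obtain ⟨news, h1, h2, h3, h4⟩ := ih (stack ++ [nb]) (visited ++ [nb])
      refine ⟨nb :: news, ?_, ?_, ?_, ?_⟩
      · rw [List.foldl_cons, pvStepA_new stack visited nb hc, h1]
        simp
      · intro x hx
        rcases List.mem_cons.1 hx with rfl | hx
        · exact ⟨List.mem_cons_self, hnbv⟩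
        · obtain ⟨hr, hnv⟩ := h2 x hx
          exact ⟨List.mem_cons_of_mem _ hr, fun hv => hnv (List.mem_append_left _ hv)⟩
      · intro x
        constructor
        · intro hx
          rcases List.mem_append.1 hx with h | h
          · exact Or.inl h
          · rcases List.mem_cons.1 h with rfl | h
            · exact Or.inr List.mem_cons_self
            · exact Or.inr (List.mem_cons_of_mem _ (h2 x h).1)
        · intro hx
          rcases hx with h | h
          · exact List.mem_append_left _ h
          · rcases List.mem_cons.1 h with rfl | h
            · exact List.mem_append_right _ List.mem_cons_self
            · have hmem := (h3 x).2 (Or.inr h)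
              rw [List.append_assoc] at hmem
              exact hmem
      · intro hnd
        have hnd1 : (visited ++ [nb]).Nodup := by
          rw [← hadd]
          exact PySem.Set.nodup_add visited nb hnd
        have h := h4 hnd1
        rw [List.append_assoc] at h
        exact h

-- main invariant of A's while-loop
theorem pvLoopA_spec (edges : List (String × List String)) (word : String) (U : List String)
    (hnbr : ∀ w x, x ∈ pvNbrs edges w → x ∈ U) :
    ∀ (fuel : Nat) (stack visited : List String),
      (∀ v ∈ stack, v ∈ visited) →
      visited.Nodup →
      (∀ v ∈ visited, v ∈ U) →
      (∀ v ∈ visited, pvReach edges word v) →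
      (∀ v ∈ visited, v ∈ stack ∨ ∀ nb ∈ pvNbrs edges v, nb ∈ visited) →
      stack.length + U.length ≤ fuel + visited.length →
      (∀ v ∈ visited, v ∈ pvLoopA edges fuel stack visited) ∧
      (pvLoopA edges fuel stack visited).Nodup ∧
      (∀ v ∈ pvLoopA edges fuel stack visited, pvReach edges word v) ∧
      (∀ v ∈ pvLoopA edges fuel stack visited, ∀ nb ∈ pvNbrs edges v, nb ∈ pvLoopA edges fuel stack visited) := by
  intro fuel
  induction fuel with
  | zero =>
    intro stack visited h1 h2 h3 h4 h5 h6
    have hsub : visited ⊆ U := fun x hx => h3 x hx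
    have hlen : visited.length ≤ U.length := (List.Nodup.subperm h2 hsub).length_le
    have hst : stack = [] := List.eq_nil_of_length_eq_zero (by omega)
    simp only [pvLoopA]
    refine ⟨fun v hv => hv, h2, h4, ?_⟩
    intro v hv nb hnb
    rcases h5 v hv with h | h
    · rw [hst] at h; cases h
    · exact h nb hnb
  | succ f ih =>
    intro stack visited h1 h2 h3 h4 h5 h6
    by_cases hst : stack = []
    · simp only [pvLoopA, dif_pos hst]
      refine ⟨fun v hv => hv, h2, h4, ?_⟩
      intro v hv nb hnb
      rcases h5 v hv with h | h
      · rw [hst] at h; cases h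
      · exact h nb hnb
    · have hw_stack : stack.getLast hst ∈ stack := List.getLast_mem hst
      have hw_vis : stack.getLast hst ∈ visited := h1 _ hw_stack
      obtain ⟨news, hfold, hmem_l, hiff, hnodup⟩ :=
        pvFoldA_spec (pvNbrs edges (stack.getLast hst)) stack.dropLast visited
      have hstep : pvLoopA edges (f+1) stack visited
          = pvLoopA edges f (stack.dropLast ++ news) (visited ++ news) := by
        simp only [pvLoopA, dif_neg hst]
        rw [hfold]
      rw [hstep]
      have hdl : stack.dropLast ⊆ stack := List.Sublist.subset (List.dropLast_sublist stack)
      have hsplit : stack.dropLast ++ [stack.getLast hst] = stack :=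
        List.dropLast_concat_getLast hst
      have H1 : ∀ v ∈ stack.dropLast ++ news, v ∈ visited ++ news := by
        intro v hv
        rcases List.mem_append.1 hv with h | h
        · exact List.mem_append_left _ (h1 v (hdl h))
        · exact List.mem_append_right _ h
      have H2 : (visited ++ news).Nodup := hnodup h2
      have H3 : ∀ v ∈ visited ++ news, v ∈ U := by
        intro v hv
        rcases List.mem_append.1 hv with h | h
        · exact h3 v h
        · exact hnbr _ v (hmem_l v h).1
      have H4 : ∀ v ∈ visited ++ news, pvReach edges word v := by
        intro v hv
        rcases List.mem_append.1 hv with h | h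
        · exact h4 v h
        · exact .step (h4 _ hw_vis) (hmem_l v h).1
      have H5 : ∀ v ∈ visited ++ news,
          v ∈ stack.dropLast ++ news ∨ ∀ nb ∈ pvNbrs edges v, nb ∈ visited ++ news := by
        intro v hv
        rcases List.mem_append.1 hv with h | h
        · by_cases hvw : v = stack.getLast hst
          · subst hvw
            exact Or.inr (fun nb hnb => (hiff nb).2 (Or.inr hnb))
          · rcases h5 v h with h' | h'
            · left
              rw [← hsplit] at h'
              rcases List.mem_append.1 h' with h'' | h''
              · exact List.mem_append_left _ h''
              · exact absurd (List.mem_singleton.1 h'') hvw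
            · exact Or.inr (fun nb hnb => List.mem_append_left _ (h' nb hnb))
        · exact Or.inl (List.mem_append_right _ h)
      have H6 : (stack.dropLast ++ news).length + U.length ≤ f + (visited ++ news).length := by
        have hlen1 : stack.dropLast.length = stack.length - 1 := List.length_dropLast
        have hpos : 0 < stack.length := List.length_pos_of_ne_nil hst
        simp only [List.length_append]
        omega
      obtain ⟨C1, C2, C3, C4⟩ := ih (stack.dropLast ++ news) (visited ++ news) H1 H2 H3 H4 H5 H6
      exact ⟨fun v hv => C1 v (List.mem_append_left _ hv), C2, C3, C4⟩

-- what A computes: a duplicate-free enumeration of exactly the reachable words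
theorem get_synonyms_A_char (word : String) (edges : List (String × List String)) :
    (pvLoopA edges ((pvUniv word edges).length + 1) [word] (PySem.Set.ofList [word])).Nodup ∧
    (∀ x, x ∈ pvLoopA edges ((pvUniv word edges).length + 1) [word] (PySem.Set.ofList [word])
          ↔ pvReach edges word x) := by
  have hof : (PySem.Set.ofList [word] : List String) = [word] := rfl
  rw [hof]
  obtain ⟨C1, C2, C3, C4⟩ :=
    pvLoopA_spec edges word (pvUniv word edges)
      (fun w x hx => mem_pvUniv_of_nbr word edges hx)
      ((pvUniv word edges).length + 1) [word] [word]
      (fun v hv => hv) (by simp)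
      (by intro v hv; rw [List.mem_singleton.1 hv]; exact word_mem_pvUniv word edges)
      (by intro v hv; rw [List.mem_singleton.1 hv]; exact .base)
      (fun v hv => Or.inl hv)
      (by simp; omega)
  refine ⟨C2, fun x => ⟨C3 x, ?_⟩⟩
  exact fun hx => pvReach_closed edges word _ (C1 word List.mem_cons_self) C4 x hx

-- main invariant of B's recursive DFS (one statement for each mutual function)
theorem pvB_spec (edges : List (String × List String)) (U : List String)
    (hnbr : ∀ w x, x ∈ pvNbrs edges w → x ∈ U) :
    ∀ fuel : Nat,
    ((∀ (visited : List String) (w : String), visited.Nodup → (∀ v ∈ visited, v ∈ U) →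
       w ∈ U → w ∉ visited → U.length ≤ fuel + visited.length →
       visited <+: pvVisitB edges fuel visited w ∧
       w ∈ pvVisitB edges fuel visited w ∧
       (pvVisitB edges fuel visited w).Nodup ∧
       (∀ v ∈ pvVisitB edges fuel visited w, v ∈ U) ∧
       (∀ v ∈ pvVisitB edges fuel visited w, v ∈ visited ∨ pvReach edges w v) ∧
       (∀ v ∈ pvVisitB edges fuel visited w, v ∈ visited ∨
          ∀ nb ∈ pvNbrs edges v, nb ∈ pvVisitB edges fuel visited w)) ∧
     (∀ (visited : List String) (l : List String), visited.Nodup → (∀ v ∈ visited, v ∈ U) →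
       (∀ x ∈ l, x ∈ U) → U.length ≤ fuel + visited.length →
       visited <+: pvForB edges fuel visited l ∧
       (pvForB edges fuel visited l).Nodup ∧
       (∀ v ∈ pvForB edges fuel visited l, v ∈ U) ∧
       (∀ x ∈ l, x ∈ pvForB edges fuel visited l) ∧
       (∀ v ∈ pvForB edges fuel visited l, v ∈ visited ∨ ∃ x ∈ l, pvReach edges x v) ∧
       (∀ v ∈ pvForB edges fuel visited l, v ∈ visited ∨
          ∀ nb ∈ pvNbrs edges v, nb ∈ pvForB edges fuel visited l))) := by
  intro fuel
  induction fuel with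
  | zero =>
    constructor
    · intro visited w hnd hvU hwU hwv hfuel
      exfalso
      have hsub : (visited ++ [w]) ⊆ U := by
        intro x hx
        rcases List.mem_append.1 hx with h | h
        · exact hvU x h
        · rw [List.mem_singleton.1 h]; exact hwU
      have hnd' : (visited ++ [w]).Nodup := by
        simp only [List.nodup_append, List.nodup_cons, List.not_mem_nil, not_false_iff, List.nodup_nil, and_true, true_and]
        refine ⟨hnd, ?_⟩
        intro a ha b hb
        rcases List.mem_singleton.1 hb with rfl
        intro h
        exact hwv (h ▸ ha)
      have := (List.Nodup.subperm hnd' hsub).length_le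
      simp at this
      omega
    · intro visited l hnd hvU hlU hfuel
      have hcover : ∀ x ∈ U, x ∈ visited := by
        intro x hx
        have hsub : visited ⊆ U := fun y hy => hvU y hy
        have := List.Subperm.perm_of_length_le (List.Nodup.subperm hnd hsub) (by omega)
        exact this.mem_iff.2 hx
      induction l with
      | nil =>
        simp only [pvForB]
        exact ⟨List.prefix_refl _, hnd, hvU, by simp, fun v hv => Or.inl hv, fun v hv => Or.inl hv⟩
      | cons nb rest ihl =>
        have hnbv : nb ∈ visited := hcover nb (hlU nb List.mem_cons_self)
        have hc : PySem.Set.contains visited nb = true := (PySem.Set.contains_iff visited nb).2 hnbv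
        have hstep : pvForB edges 0 visited (nb :: rest) = pvForB edges 0 visited rest := by
          simp only [pvForB, hc, if_true]
        rw [hstep]
        obtain ⟨D1, D2, D3, D4, D5, D6⟩ := ihl (fun x hx => hlU x (List.mem_cons_of_mem _ hx))
        refine ⟨D1, D2, D3, ?_, ?_, D6⟩
        · intro x hx
          rcases List.mem_cons.1 hx with rfl | hx
          · exact D1.subset hnbv
          · exact D4 x hx
        · intro v hv
          rcases D5 v hv with h | ⟨x, hx, hr⟩
          · exact Or.inl h
          · exact Or.inr ⟨x, List.mem_cons_of_mem _ hx, hr⟩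
  | succ f ihf =>
    have hvisit : ∀ (visited : List String) (w : String), visited.Nodup → (∀ v ∈ visited, v ∈ U) →
        w ∈ U → w ∉ visited → U.length ≤ (f+1) + visited.length →
        visited <+: pvVisitB edges (f+1) visited w ∧
        w ∈ pvVisitB edges (f+1) visited w ∧
        (pvVisitB edges (f+1) visited w).Nodup ∧
        (∀ v ∈ pvVisitB edges (f+1) visited w, v ∈ U) ∧
        (∀ v ∈ pvVisitB edges (f+1) visited w, v ∈ visited ∨ pvReach edges w v) ∧
        (∀ v ∈ pvVisitB edges (f+1) visited w, v ∈ visited ∨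
           ∀ nb ∈ pvNbrs edges v, nb ∈ pvVisitB edges (f+1) visited w) := by
      intro visited w hnd hvU hwU hwv hfuel
      have hc : PySem.Set.contains visited w = false := by
        cases hc : PySem.Set.contains visited w with
        | false => rfl
        | true => exact absurd ((PySem.Set.contains_iff visited w).1 hc) hwv
      have hadd : PySem.Set.add visited w = visited ++ [w] := by
        unfold PySem.Set.add
        rw [hc]
        simp
      have hstep : pvVisitB edges (f+1) visited w
          = pvForB edges f (visited ++ [w]) (pvNbrs edges w) := by
        simp only [pvVisitB]
        rw [hadd]
      rw [hstep]
      have hnd' : (visited ++ [w]).Nodup := by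
        simp only [List.nodup_append, List.nodup_cons, List.not_mem_nil, not_false_iff, List.nodup_nil, and_true, true_and]
        refine ⟨hnd, ?_⟩
        intro a ha b hb
        rcases List.mem_singleton.1 hb with rfl
        intro h
        exact hwv (h ▸ ha)
      have hvU' : ∀ v ∈ visited ++ [w], v ∈ U := by
        intro v hv
        rcases List.mem_append.1 hv with h | h
        · exact hvU v h
        · rw [List.mem_singleton.1 h]; exact hwU
      obtain ⟨D1, D2, D3, D4, D5, D6⟩ := ihf.2 (visited ++ [w]) (pvNbrs edges w) hnd' hvU'
        (fun x hx => hnbr w x hx) (by simp; omega)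
      have hpre : visited <+: pvForB edges f (visited ++ [w]) (pvNbrs edges w) :=
        (List.prefix_append visited [w]).trans D1
      have hwmem : w ∈ pvForB edges f (visited ++ [w]) (pvNbrs edges w) :=
        D1.subset (List.mem_append_right _ (List.mem_singleton_self w))
      refine ⟨hpre, hwmem, D2, D3, ?_, ?_⟩
      · intro v hv
        rcases D5 v hv with h | ⟨x, hx, hr⟩
        · rcases List.mem_append.1 h with h' | h'
          · exact Or.inl h'
          · rw [List.mem_singleton.1 h']; exact Or.inr .base
        · exact Or.inr (pvReach_trans edges (.step .base hx) hr)
      · intro v hv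
        rcases D6 v hv with h | h
        · rcases List.mem_append.1 h with h' | h'
          · exact Or.inl h'
          · rw [List.mem_singleton.1 h']
            exact Or.inr (fun nb hnb => D4 nb hnb)
        · exact Or.inr h
    refine ⟨hvisit, ?_⟩
    intro visited l
    induction l generalizing visited with
    | nil =>
      intro hnd hvU hlU hfuel
      simp only [pvForB]
      exact ⟨List.prefix_refl _, hnd, hvU, by simp, fun v hv => Or.inl hv, fun v hv => Or.inl hv⟩
    | cons nb rest ihl =>
      intro hnd hvU hlU hfuel
      cases hc : PySem.Set.contains visited nb with
      | true =>
        have hnbv : nb ∈ visited := (PySem.Set.contains_iff visited nb).1 hc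
        have hstep : pvForB edges (f+1) visited (nb :: rest) = pvForB edges (f+1) visited rest := by
          simp only [pvForB, hc, if_true]
        rw [hstep]
        obtain ⟨D1, D2, D3, D4, D5, D6⟩ :=
          ihl visited hnd hvU (fun x hx => hlU x (List.mem_cons_of_mem _ hx)) hfuel
        refine ⟨D1, D2, D3, ?_, ?_, D6⟩
        · intro x hx
          rcases List.mem_cons.1 hx with rfl | hx
          · exact D1.subset hnbv
          · exact D4 x hx
        · intro v hv
          rcases D5 v hv with h | ⟨x, hx, hr⟩
          · exact Or.inl h
          · exact Or.inr ⟨x, List.mem_cons_of_mem _ hx, hr⟩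
      | false =>
        have hnbv : nb ∉ visited := by
          intro h
          rw [(PySem.Set.contains_iff visited nb).2 h] at hc
          simp at hc
        have hstep : pvForB edges (f+1) visited (nb :: rest)
            = pvForB edges (f+1) (pvVisitB edges (f+1) visited nb) rest := by
          simp only [pvForB, hc]
          rw [if_neg (by simp)]
        rw [hstep]
        obtain ⟨V1, V2, V3, V4, V5, V6⟩ :=
          hvisit visited nb hnd hvU (hlU nb List.mem_cons_self) hnbv hfuel
        have hlen1 : visited.length ≤ (pvVisitB edges (f+1) visited nb).length := V1.length_le
        obtain ⟨D1, D2, D3, D4, D5, D6⟩ :=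
          ihl (pvVisitB edges (f+1) visited nb) V3 V4
            (fun x hx => hlU x (List.mem_cons_of_mem _ hx)) (by omega)
        refine ⟨V1.trans D1, D2, D3, ?_, ?_, ?_⟩
        · intro x hx
          rcases List.mem_cons.1 hx with rfl | hx
          · exact D1.subset V2
          · exact D4 x hx
        · intro v hv
          rcases D5 v hv with h | ⟨x, hx, hr⟩
          · rcases V5 v h with h' | h'
            · exact Or.inl h'
            · exact Or.inr ⟨nb, List.mem_cons_self, h'⟩
          · exact Or.inr ⟨x, List.mem_cons_of_mem _ hx, hr⟩
        · intro v hv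
          rcases D6 v hv with h | h
          · rcases V6 v h with h' | h'
            · exact Or.inl h'
            · exact Or.inr (fun nb' hnb' => D1.subset (h' nb' hnb'))
          · exact Or.inr h

-- what B computes: a duplicate-free enumeration of exactly the reachable words
theorem get_synonyms_B_char (word : String) (edges : List (String × List String)) :
    (pvVisitB edges (pvUniv word edges).length PySem.Set.empty word).Nodup ∧
    (∀ x, x ∈ pvVisitB edges (pvUniv word edges).length PySem.Set.empty word
          ↔ pvReach edges word x) := by
  obtain ⟨V1, V2, V3, V4, V5, V6⟩ :=
    (pvB_spec edges (pvUniv word edges)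
      (fun w x hx => mem_pvUniv_of_nbr word edges hx) (pvUniv word edges).length).1
      [] word (by simp) (by simp) (word_mem_pvUniv word edges) (by simp) (by omega)
  refine ⟨V3, fun x => ⟨?_, ?_⟩⟩
  · intro hx
    rcases V5 x hx with h | h
    · cases h
    · exact h
  · intro hx
    refine pvReach_closed edges word _ V2 ?_ x hx
    intro v hv nb hnb
    rcases V6 v hv with h | h
    · cases h
    · exact h nb hnb

-- ===== VERDICT (by name: the statement is the Claim_ definition above) =====
theorem get_synonyms_spec : Claim_equal_get_synonyms := by
  intro word edges _
  unfold Spec_get_synonyms get_synonyms get_synonyms_alt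
  obtain ⟨hAnd, hAmem⟩ := get_synonyms_A_char word edges
  obtain ⟨hBnd, hBmem⟩ := get_synonyms_B_char word edges
  have hperm : (pvLoopA edges ((pvUniv word edges).length + 1) [word] (PySem.Set.ofList [word])).Perm
      (pvVisitB edges (pvUniv word edges).length PySem.Set.empty word) :=
    (List.perm_ext_iff_of_nodup hAnd hBnd).2 (fun a => (hAmem a).trans (hBmem a).symm)
  exact PySem.List.sorted_eq_sorted_of_perm _ _ (fun x => x) (fun a b h => h) hperm
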